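-- pv_equiv track=rewrite | github.com/YueruSally/check | renewcheck/main.py | china_border_monotone_ok
-- ===== SOURCE A (Python) =====
-- from typing import Dict, List, Tuple, Optional
--
-- CHINA_REGIONS = {"CN"}
--
-- CHINA_BORDER_NODES: set = {"Erenhot", "Manzhouli", "Khorgos", "Lianyungang",
--                             "Chongqing", "Yiwu"}
--
-- def china_border_monotone_ok(nodes: List[str], node_region: Dict[str, str]) -> bool:
--     """
--     口岸单调性约束：
--     1. 经过口岸节点后，不得再访问任何中国节点（内地或其他口岸）
--     2. 一旦离开中国区域，不得再回到中国区域
--     特殊情况：若起点本身是口岸节点（如 Yiwu 出发），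
--     则第一个节点不触发 passed_border，允许先访问其他节点再出境。
--     """
--     passed_border = False
--     left_china = False
--     start_is_border = (len(nodes) > 0 and nodes[0] in CHINA_BORDER_NODES)
--
--     for i, n in enumerate(nodes):
--         r = str(node_region.get(n, "")).strip()
--         in_china = (r in CHINA_REGIONS)
--         is_border = (n in CHINA_BORDER_NODES)
--
--         # 规则1：离开中国后不得折返
--         if left_china and in_china:
--             return False
--
--         if in_china:
--             # 规则2：经过口岸后，不得再访问任何中国节点（含内地和其他口岸）
--             if passed_border:
--                 return False
--             # 标记经过口岸（起点是口岸时，第一个节点不触发）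
--             if is_border and not (i == 0 and start_is_border):
--                 passed_border = True
--         else:
--             left_china = True
--
--     return True
-- ===== SOURCE B (Python) =====
-- from typing import Dict, List
--
-- CHINA_REGIONS = {"CN"}
--
-- CHINA_BORDER_NODES: set = {"Erenhot", "Manzhouli", "Khorgos", "Lianyungang",
--                            "Chongqing", "Yiwu"}
--
-- def china_border_monotone_ok(nodes: List[str], node_region: Dict[str, str]) -> bool:
--     # Table + two shaped passes instead of a live two-flag state machine.
--     in_china = [str(node_region.get(n, "")).strip() in CHINA_REGIONS for n in nodes]
--     block_at = len(nodes)
--     for i, n in enumerate(nodes):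
--         # non-China first (a border node outside CN counts as leaving China);
--         # a border node at index 0 never triggers the block.
--         if not in_china[i] or (n in CHINA_BORDER_NODES and i > 0):
--             block_at = i
--             break
--     return not any(in_china[j] for j in range(block_at + 1, len(nodes)))
-- ===== Notes on version B (the rewrite author's own statement) =====
-- stated objective: simpler
-- what changed: Replaced A's two-flag (passed_border/left_china) state machine by a precomputed in-China boolean table, a single scan for the first blocking index, and a check that no China node follows it.
import Mathlib
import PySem

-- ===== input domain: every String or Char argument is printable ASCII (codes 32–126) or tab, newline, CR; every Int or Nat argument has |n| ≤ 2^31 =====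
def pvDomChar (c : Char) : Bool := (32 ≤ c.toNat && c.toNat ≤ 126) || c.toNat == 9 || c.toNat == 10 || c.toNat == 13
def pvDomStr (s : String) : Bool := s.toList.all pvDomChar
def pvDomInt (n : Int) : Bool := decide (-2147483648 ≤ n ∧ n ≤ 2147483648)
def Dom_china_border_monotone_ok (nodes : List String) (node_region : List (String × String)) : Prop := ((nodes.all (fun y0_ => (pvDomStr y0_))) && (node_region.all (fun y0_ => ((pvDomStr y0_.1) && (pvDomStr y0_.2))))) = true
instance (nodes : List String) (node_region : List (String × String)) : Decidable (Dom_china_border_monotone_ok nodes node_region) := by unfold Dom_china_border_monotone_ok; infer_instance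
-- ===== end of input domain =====

-- B replaces A's live two-flag state machine by a precomputed in-China table, a first-trigger
-- index scan and a tail check (objective: simpler decomposition, same O(n) cost).

-- shared constants and elementary tests (used by both ports)
def pvChinaRegions : PySem.Set String := PySem.Set.ofList ["CN"]
def pvBorderNodes : PySem.Set String :=
  PySem.Set.ofList ["Erenhot", "Manzhouli", "Khorgos", "Lianyungang", "Chongqing", "Yiwu"]
-- str(node_region.get(n, "")).strip() in CHINA_REGIONS  (str() is the identity on str values)
def pvInC (nr : List (String × String)) (n : String) : Bool :=
  PySem.Set.contains pvChinaRegions (PySem.Str.strip ((PySem.Dict.mk nr).getD n ""))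
-- n in CHINA_BORDER_NODES
def pvIsB (n : String) : Bool := PySem.Set.contains pvBorderNodes n

-- ===== PORT A =====
-- the for-loop of A: state (i, passed_border, left_china)
def pvALoop (nr : List (String × String)) (startB : Bool) :
    List String → Nat → Bool → Bool → Bool
  | [], _, _, _ => true
  | n :: rest, i, pb, lc =>
    if lc && pvInC nr n then false
    else if pvInC nr n then
      if pb then false
      else if pvIsB n && !(decide (i = 0) && startB) then
        pvALoop nr startB rest (i + 1) true lc
      else
        pvALoop nr startB rest (i + 1) pb lc
    else
      pvALoop nr startB rest (i + 1) pb true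

def china_border_monotone_ok (nodes : List String) (node_region : List (String × String)) : Bool :=
  let startB := decide (0 < nodes.length) && pvIsB nodes.headI
  pvALoop node_region startB nodes 0 false false

-- ===== PORT B =====
-- Source B's first loop: find block_at (break on first trigger; default len(nodes))
def pvBFind : List String → List Bool → Nat → Nat
  | [], _, i => i
  | _ :: _, [], i => i   -- unreachable: the two tables have equal length
  | n :: rest, c :: cs, i =>
    if !c || (pvIsB n && decide (0 < i)) then i
    else pvBFind rest cs (i + 1)

def china_border_monotone_ok_alt (nodes : List String) (node_region : List (String × String)) : Bool :=
  let inChina := nodes.map (pvInC node_region)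
  let blockAt := pvBFind nodes inChina 0
  !((inChina.drop (blockAt + 1)).any id)

-- ===== PRECONDITION & SPEC =====
def Spec_china_border_monotone_ok (nodes : List String) (node_region : List (String × String)) (out : Bool) : Prop := out = china_border_monotone_ok_alt nodes node_region
instance (nodes : List String) (node_region : List (String × String)) (out : Bool) : Decidable (Spec_china_border_monotone_ok nodes node_region out) := by unfold Spec_china_border_monotone_ok; infer_instance

-- ===== CLAIM (what is proved, stated in full; the proofs are below) =====
def Claim_equal_china_border_monotone_ok : Prop := ∀ (nodes : List String) (node_region : List (String × String)), Dom_china_border_monotone_ok nodes node_region → Spec_china_border_monotone_ok nodes node_region (china_border_monotone_ok nodes node_region)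

-- ===== LEMMAS AND PROOFS =====

-- single-flag reformulation of A's loop away from index 0
def pvG (nr : List (String × String)) : List String → Bool → Bool
  | [], _ => true
  | n :: rest, t =>
    if t && pvInC nr n then false
    else pvG nr rest (t || !pvInC nr n || pvIsB n)

-- offset of the first trigger in a suffix lying strictly after index 0
def pvF (nr : List (String × String)) : List String → Nat
  | [] => 0
  | n :: rest => if !pvInC nr n || pvIsB n then 0 else pvF nr rest + 1

theorem pvALoop_eq_pvG (nr : List (String × String)) (sb : Bool) :
    ∀ (rest : List String) (i : Nat) (pb lc : Bool), i ≠ 0 →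
      pvALoop nr sb rest i pb lc = pvG nr rest (pb || lc) := by
  intro rest
  induction rest with
  | nil => intro i pb lc _; simp [pvALoop, pvG]
  | cons n rest ih =>
    intro i pb lc hi
    have h0 : decide (i = 0) = false := by simp [hi]
    simp only [pvALoop, pvG, h0, Bool.false_and, Bool.not_false, Bool.and_true]
    cases hc : pvInC nr n <;> cases hb : pvIsB n <;>
      cases pb <;> cases lc <;>
      simp [ih (i + 1) _ _ (Nat.succ_ne_zero i)]

theorem pvG_true (nr : List (String × String)) :
    ∀ (rest : List String), pvG nr rest true = !(rest.any (pvInC nr)) := by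
  intro rest
  induction rest with
  | nil => simp [pvG]
  | cons n rest ih =>
    simp only [pvG, List.any_cons]
    cases hc : pvInC nr n <;> simp [ih]

theorem pvBFind_shift (nr : List (String × String)) :
    ∀ (rest : List String) (i : Nat), 0 < i →
      pvBFind rest (rest.map (pvInC nr)) i = i + pvF nr rest := by
  intro rest
  induction rest with
  | nil => intro i _; simp [pvBFind, pvF]
  | cons n rest ih =>
    intro i hi
    have h0 : decide (0 < i) = true := by simp [hi]
    simp only [List.map_cons, pvBFind, pvF, h0, Bool.and_true]
    cases hc : pvInC nr n <;> cases hb : pvIsB n <;>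
      simp [ih (i + 1) (Nat.succ_pos i)] <;> omega

theorem pvG_false_eq_drop (nr : List (String × String)) :
    ∀ (rest : List String),
      pvG nr rest false = !(((rest.map (pvInC nr)).drop (pvF nr rest + 1)).any id) := by
  intro rest
  induction rest with
  | nil => simp [pvG, pvF]
  | cons n rest ih =>
    simp only [pvG, pvF, List.map_cons, Bool.false_and, Bool.false_or]
    cases hc : pvInC nr n <;> cases hb : pvIsB n <;>
      simp [pvG_true, List.any_map, ih, List.drop_succ_cons]

-- ===== VERDICT (by name: the statement is the Claim_ definition above) =====
theorem china_border_monotone_ok_spec : Claim_equal_china_border_monotone_ok := by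
  intro nodes node_region _
  unfold Spec_china_border_monotone_ok china_border_monotone_ok china_border_monotone_ok_alt
  cases nodes with
  | nil => simp [pvALoop, pvBFind]
  | cons n0 rest =>
    have hstart : (decide (0 < (n0 :: rest).length) && pvIsB (n0 :: rest).headI)
        = pvIsB n0 := by simp
    simp only [hstart, List.map_cons]
    cases hc : pvInC node_region n0
    · -- first node not in China: A sets left_china; B blocks at index 0
      have hA : pvALoop node_region (pvIsB n0) (n0 :: rest) 0 false false
          = pvALoop node_region (pvIsB n0) rest 1 false true := by
        simp [pvALoop, hc]
      have hB : pvBFind (n0 :: rest) (pvInC node_region n0 :: rest.map (pvInC node_region)) 0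
          = 0 := by
        simp [pvBFind, hc]
      rw [hc] at hB
      rw [hA, hB, pvALoop_eq_pvG node_region _ rest 1 false true one_ne_zero,
        Bool.false_or, pvG_true]
      simp [hc, List.any_map]
    · -- first node in China: the index-0 border exemption means no trigger at 0
      have hA : pvALoop node_region (pvIsB n0) (n0 :: rest) 0 false false
          = pvALoop node_region (pvIsB n0) rest 1 false false := by
        cases h : pvIsB n0 <;> simp [pvALoop, hc, h]
      have hB : pvBFind (n0 :: rest) (pvInC node_region n0 :: rest.map (pvInC node_region)) 0
          = pvBFind rest (rest.map (pvInC node_region)) 1 := by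
        simp [pvBFind, hc]
      rw [hc] at hB
      rw [hA, hB, pvALoop_eq_pvG node_region _ rest 1 false false one_ne_zero,
        Bool.false_or, pvBFind_shift node_region rest 1 one_pos,
        pvG_false_eq_drop]
      have hidx : 1 + pvF node_region rest + 1 = (pvF node_region rest + 1) + 1 := by omega
      rw [hidx, List.drop_succ_cons]
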